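-- pv_equiv track=rewrite | github.com/JanBancerewicz/research-project | peaks.py | get_peak_diff
-- ===== SOURCE A (Python) =====
-- def get_peak_diff(peaks, valleys, heart_rate):
--     peaks_rate = []
--     valleys_rate = []
--     for val in valleys:
--         valleys_rate.append(heart_rate[val])
--     for peak in peaks:
--         peaks_rate.append(heart_rate[peak])
--
--     peaks_diff = []
--     if peaks[0] < valleys[0]:
--         for i in range(len(valleys_rate)):
--             peaks_diff.append(peaks_rate[i] - valleys_rate[i])
--             try:
--                 peaks_diff.append(valleys_rate[i] - peaks_rate[i + 1])
--             except IndexError:  # KIEP detected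
--                 pass
--     else:
--         for i in range(len(peaks_rate)):
--             peaks_diff.append(peaks_rate[i] - valleys_rate[i])
--             try:
--                 peaks_diff.append(valleys_rate[i + 1] - peaks_rate[i])
--             except IndexError:
--                 pass
--     return peaks_diff
-- ===== SOURCE B (Python) =====
-- def get_peak_diff(peaks, valleys, heart_rate):
--     peaks_rate = [heart_rate[p] for p in peaks]
--     valleys_rate = [heart_rate[v] for v in valleys]
--     if peaks[0] < valleys[0]:
--         # peak-first: interleave p0,v0,p1,v1,...(,p_n) and take prev-next differences
--         seq = []
--         for i in range(len(valleys_rate)):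
--             seq.append(peaks_rate[i])
--             seq.append(valleys_rate[i])
--         if len(peaks_rate) > len(valleys_rate):
--             seq.append(peaks_rate[len(valleys_rate)])
--         return [seq[j] - seq[j + 1] for j in range(len(seq) - 1)]
--     else:
--         # valley-first: interleave v0,p0,v1,p1,...(,v_m) and take next-prev differences
--         seq = []
--         for i in range(len(peaks_rate)):
--             seq.append(valleys_rate[i])
--             seq.append(peaks_rate[i])
--         if len(valleys_rate) > len(peaks_rate):
--             seq.append(valleys_rate[len(peaks_rate)])
--         return [seq[j + 1] - seq[j] for j in range(len(seq) - 1)]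
-- ===== Notes on version B (the rewrite author's own statement) =====
-- stated objective: alternative
-- what changed: B builds one interleaved sequence of peak/valley heart-rate values (peak-first or valley-first, with at most one trailing extra element where A's caught IndexError stops) and emits consecutive differences in a single sweep, replacing A's two index-arithmetic loops with try/except on [i+1].
import Mathlib
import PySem

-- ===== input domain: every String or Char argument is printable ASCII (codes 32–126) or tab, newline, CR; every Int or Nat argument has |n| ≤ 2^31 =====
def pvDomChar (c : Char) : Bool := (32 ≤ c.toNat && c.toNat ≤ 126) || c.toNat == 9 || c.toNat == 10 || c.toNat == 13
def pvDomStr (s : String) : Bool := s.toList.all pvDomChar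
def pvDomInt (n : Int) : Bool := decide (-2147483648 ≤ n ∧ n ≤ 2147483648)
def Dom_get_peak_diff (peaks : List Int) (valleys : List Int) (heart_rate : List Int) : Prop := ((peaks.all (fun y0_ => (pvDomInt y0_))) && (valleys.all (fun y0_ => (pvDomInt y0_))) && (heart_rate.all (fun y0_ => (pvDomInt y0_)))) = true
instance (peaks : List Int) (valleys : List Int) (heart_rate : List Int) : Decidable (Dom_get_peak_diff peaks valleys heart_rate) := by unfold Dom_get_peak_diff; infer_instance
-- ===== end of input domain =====

-- B replaces A's two index loops + try/except with one interleaved sequence and a single pairwise-difference sweep (objective: alternative decomposition).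

-- ===== PORT A =====
-- try/except IndexError around 'acc.append(g(x))': append when the lookup succeeded, else pass
def pvTry (acc : List Int) (q : Option Int) (g : Int → Int) : List Int :=
  match q with
  | some x => acc ++ [g x]
  | none => acc

def get_peak_diff (peaks : List Int) (valleys : List Int) (heart_rate : List Int) : List Int :=
  let valleys_rate := valleys.foldl (fun acc v => acc ++ [PySem.List.pyGetD heart_rate v 0]) []
  let peaks_rate := peaks.foldl (fun acc p => acc ++ [PySem.List.pyGetD heart_rate p 0]) []
  if PySem.List.pyGetD peaks 0 0 < PySem.List.pyGetD valleys 0 0 then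
    (PySem.List.pyRange 0 valleys_rate.length 1).foldl (fun acc i =>
      pvTry (acc ++ [PySem.List.pyGetD peaks_rate i 0 - PySem.List.pyGetD valleys_rate i 0])
        (PySem.List.pyGet? peaks_rate (i + 1))
        (fun x => PySem.List.pyGetD valleys_rate i 0 - x)) []
  else
    (PySem.List.pyRange 0 peaks_rate.length 1).foldl (fun acc i =>
      pvTry (acc ++ [PySem.List.pyGetD peaks_rate i 0 - PySem.List.pyGetD valleys_rate i 0])
        (PySem.List.pyGet? valleys_rate (i + 1))
        (fun x => x - PySem.List.pyGetD peaks_rate i 0)) []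

-- ===== PORT B =====
def get_peak_diff_alt (peaks : List Int) (valleys : List Int) (heart_rate : List Int) : List Int :=
  let peaks_rate := peaks.map (fun p => PySem.List.pyGetD heart_rate p 0)
  let valleys_rate := valleys.map (fun v => PySem.List.pyGetD heart_rate v 0)
  if PySem.List.pyGetD peaks 0 0 < PySem.List.pyGetD valleys 0 0 then
    -- peak-first: interleave p0,v0,p1,v1,...(,p_n), prev-next differences
    let seq := (PySem.List.pyRange 0 valleys_rate.length 1).foldl
      (fun s i => s ++ [PySem.List.pyGetD peaks_rate i 0, PySem.List.pyGetD valleys_rate i 0]) []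
    let seq := if valleys_rate.length < peaks_rate.length
      then seq ++ [PySem.List.pyGetD peaks_rate (valleys_rate.length) 0] else seq
    (PySem.List.pyRange 0 ((seq.length : Int) - 1) 1).map
      (fun j => PySem.List.pyGetD seq j 0 - PySem.List.pyGetD seq (j + 1) 0)
  else
    -- valley-first: interleave v0,p0,v1,p1,...(,v_m), next-prev differences
    let seq := (PySem.List.pyRange 0 peaks_rate.length 1).foldl
      (fun s i => s ++ [PySem.List.pyGetD valleys_rate i 0, PySem.List.pyGetD peaks_rate i 0]) []
    let seq := if peaks_rate.length < valleys_rate.length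
      then seq ++ [PySem.List.pyGetD valleys_rate (peaks_rate.length) 0] else seq
    (PySem.List.pyRange 0 ((seq.length : Int) - 1) 1).map
      (fun j => PySem.List.pyGetD seq (j + 1) 0 - PySem.List.pyGetD seq j 0)

-- ===== PRECONDITION & SPEC =====
-- Pre_ is exactly where A returns: nonempty peaks and valleys (A reads peaks[0]/valleys[0]), every index
-- valid for heart_rate (Python semantics, negative ok), and the branch-dependent length condition under
-- which A's uncaught rate lookups at index i stay in range (otherwise A raises IndexError).
def Pre_get_peak_diff (peaks : List Int) (valleys : List Int) (heart_rate : List Int) : Prop :=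
  peaks ≠ [] ∧ valleys ≠ [] ∧
  (∀ p ∈ peaks, PySem.Raise.InRange heart_rate.length p) ∧
  (∀ v ∈ valleys, PySem.Raise.InRange heart_rate.length v) ∧
  (if peaks.headI < valleys.headI then valleys.length ≤ peaks.length else peaks.length ≤ valleys.length)
instance (peaks : List Int) (valleys : List Int) (heart_rate : List Int) : Decidable (Pre_get_peak_diff peaks valleys heart_rate) := by unfold Pre_get_peak_diff; infer_instance

def pvWitness_get_peak_diff : List Int × List Int × List Int := ([1], [0], [10, 5])

def Spec_get_peak_diff (peaks : List Int) (valleys : List Int) (heart_rate : List Int) (out : List Int) : Prop := out = get_peak_diff_alt peaks valleys heart_rate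
instance (peaks : List Int) (valleys : List Int) (heart_rate : List Int) (out : List Int) : Decidable (Spec_get_peak_diff peaks valleys heart_rate out) := by unfold Spec_get_peak_diff; infer_instance

-- ===== CLAIM (what is proved, stated in full; the proofs are below) =====
def Claim_equal_get_peak_diff : Prop := ∀ (peaks : List Int) (valleys : List Int) (heart_rate : List Int), Dom_get_peak_diff peaks valleys heart_rate → Pre_get_peak_diff peaks valleys heart_rate → Spec_get_peak_diff peaks valleys heart_rate (get_peak_diff peaks valleys heart_rate)

-- ===== LEMMAS AND PROOFS =====

-- the tail contributed by one caught-IndexError append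
def pvTail (q : Option Int) (g : Int → Int) : List Int :=
  match q with
  | some x => [g x]
  | none => []

theorem pvTry_eq (acc : List Int) (q : Option Int) (g : Int → Int) :
    pvTry acc q g = acc ++ pvTail q g := by
  cases q <;> simp [pvTry, pvTail]

-- prev-next pairwise differences
def pvDif1 : List Int → List Int
  | a :: b :: t => (a - b) :: pvDif1 (b :: t)
  | _ => []

-- next-prev pairwise differences
def pvDif2 : List Int → List Int
  | a :: b :: t => (b - a) :: pvDif2 (b :: t)
  | _ => []

-- interleave first-list-first, with one trailing extra element of the first list
def pvIl : List Int → List Int → List Int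
  | p :: ps, v :: vs => p :: v :: pvIl ps vs
  | p :: _, [] => [p]
  | [], _ => []

theorem pvIl_cons_head (p : Int) (ps vs : List Int) :
    ∃ t, pvIl (p :: ps) vs = p :: t := by
  cases vs <;> simp [pvIl]

-- an 'append each step' foldl is an accumulator plus a flatMap
theorem pvFoldlShape (step : List Int → Int → List Int) (u : Int → List Int)
    (hstep : ∀ a i, step a i = a ++ u i) :
    ∀ (l : List Int) (acc : List Int), List.foldl step acc l = acc ++ l.flatMap u := by
  intro l
  induction l with
  | nil => intro acc; simp
  | cons i t ih => intro acc; rw [List.foldl_cons, hstep, List.flatMap_cons, ih, List.append_assoc]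

-- flatMap over range(0, n) with an Int index is flatMap over the Nat range, cast
theorem pvFlatMapRange (u : Int → List Int) : ∀ n : Nat,
    (PySem.List.pyRange 0 (n : Int) 1).flatMap u = (List.range n).flatMap (fun (k : Nat) => u (k : Int)) := by
  intro n
  induction n with
  | zero => simp [PySem.List.pyRange_one_eq_nil]
  | succ m ih =>
    rw [show ((m + 1 : Nat) : Int) = (m : Int) + 1 by push_cast; ring,
        PySem.List.pyRange_one_succ_right (by positivity), List.range_succ,
        List.flatMap_append, List.flatMap_append, ih]
    simp

-- factor an 'if' that only decides a trailing append
theorem pvIfApp (c : Prop) [Decidable c] (X Y : List Int) :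
    (if c then X ++ Y else X) = X ++ (if c then Y else []) := by
  split <;> simp

theorem pvCastSucc (k : Nat) : ((k : Int) + 1) = ((k + 1 : Nat) : Int) := by push_cast; ring

-- A's then-branch loop, flattened, equals the pairwise differences of the interleave
theorem lemA1 (vr : List Int) : ∀ pr : List Int, vr.length ≤ pr.length →
    (List.range vr.length).flatMap
      (fun i => [pr.getD i 0 - vr.getD i 0] ++ pvTail pr[i + 1]? (fun x => vr.getD i 0 - x))
      = pvDif1 (pvIl pr vr) := by
  induction vr with
  | nil => intro pr _; cases pr <;> simp [pvIl, pvDif1]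
  | cons v vs ih =>
    intro pr h
    match pr with
    | [] => simp at h
    | p :: ps =>
      rw [List.length_cons, List.range_succ_eq_map, List.flatMap_cons, List.flatMap_map]
      have htl : vs.length ≤ ps.length := by simpa using h
      have ihh := ih ps htl
      simp only [Nat.succ_eq_add_one, List.getD_cons_succ,
        List.getD_cons_zero, List.getElem?_cons_succ]
      rw [ihh]
      match ps, htl with
      | [], htl =>
        have : vs = [] := by simpa using htl
        subst this
        simp [pvIl, pvDif1, pvTail]
      | p' :: ps', _ =>
        obtain ⟨t, ht⟩ := pvIl_cons_head p' ps' vs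
        simp [pvIl, ht, pvDif1, pvTail]

-- A's else-branch loop, flattened, equals the next-prev differences of the valley-first interleave
theorem lemA2 (pr : List Int) : ∀ vr : List Int, pr.length ≤ vr.length →
    (List.range pr.length).flatMap
      (fun i => [pr.getD i 0 - vr.getD i 0] ++ pvTail vr[i + 1]? (fun x => x - pr.getD i 0))
      = pvDif2 (pvIl vr pr) := by
  induction pr with
  | nil => intro vr _; cases vr <;> simp [pvIl, pvDif2]
  | cons p ps ih =>
    intro vr h
    match vr with
    | [] => simp at h
    | v :: vs =>
      rw [List.length_cons, List.range_succ_eq_map, List.flatMap_cons, List.flatMap_map]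
      have htl : ps.length ≤ vs.length := by simpa using h
      have ihh := ih vs htl
      simp only [Nat.succ_eq_add_one, List.getD_cons_succ,
        List.getD_cons_zero, List.getElem?_cons_succ]
      rw [ihh]
      match vs, htl with
      | [], htl =>
        have : ps = [] := by simpa using htl
        subst this
        simp [pvIl, pvDif2, pvTail]
      | v' :: vs', _ =>
        obtain ⟨t, ht⟩ := pvIl_cons_head v' vs' ps
        simp [pvIl, ht, pvDif2, pvTail]

-- B's interleaving loop plus the optional trailing element builds exactly pvIl
theorem lemB (b : List Int) : ∀ a : List Int, b.length ≤ a.length →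
    (List.range b.length).flatMap (fun i => [a.getD i 0, b.getD i 0]) ++
      (if b.length < a.length then [a.getD b.length 0] else []) = pvIl a b := by
  induction b with
  | nil => intro a _; cases a <;> simp [pvIl]
  | cons v vs ih =>
    intro a h
    match a with
    | [] => simp at h
    | p :: ps =>
      rw [List.length_cons, List.range_succ_eq_map, List.flatMap_cons, List.flatMap_map]
      have htl : vs.length ≤ ps.length := by simpa using h
      have ihh := ih ps htl
      simp only [Nat.succ_eq_add_one, List.getD_cons_succ,
        List.getD_cons_zero, List.length_cons, Nat.add_lt_add_iff_right]
      simp [pvIl, ← ihh]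

-- the pairwise-difference comprehensions evaluate pvDif1/pvDif2
theorem lemD1 (s : List Int) :
    (List.range (s.length - 1)).map (fun k => s.getD k 0 - s.getD (k + 1) 0) = pvDif1 s := by
  match s with
  | [] => simp [pvDif1]
  | [a] => simp [pvDif1]
  | a :: b :: t =>
    have ihh := lemD1 (b :: t)
    simp only [List.length_cons, Nat.add_sub_cancel] at ihh
    rw [show (a :: b :: t).length - 1 = t.length + 1 by simp,
        List.range_succ_eq_map, List.map_cons, List.map_map]
    simp only [Function.comp_def, Nat.succ_eq_add_one, List.getD_cons_succ, List.getD_cons_zero]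
    simp only [List.getD_cons_succ] at ihh
    rw [ihh]
    simp [pvDif1]

theorem lemD2 (s : List Int) :
    (List.range (s.length - 1)).map (fun k => s.getD (k + 1) 0 - s.getD k 0) = pvDif2 s := by
  match s with
  | [] => simp [pvDif2]
  | [a] => simp [pvDif2]
  | a :: b :: t =>
    have ihh := lemD2 (b :: t)
    simp only [List.length_cons, Nat.add_sub_cancel] at ihh
    rw [show (a :: b :: t).length - 1 = t.length + 1 by simp,
        List.range_succ_eq_map, List.map_cons, List.map_map]
    simp only [Function.comp_def, Nat.succ_eq_add_one, List.getD_cons_succ, List.getD_cons_zero]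
    simp only [List.getD_cons_succ] at ihh
    rw [ihh]
    simp [pvDif2]

-- B's comprehension over the interleave, with Int casts resolved
theorem pvMapDiff1 (s : List Int) :
    (PySem.List.pyRange 0 ((s.length : Int) - 1) 1).map
      (fun j => PySem.List.pyGetD s j 0 - PySem.List.pyGetD s (j + 1) 0) = pvDif1 s := by
  rw [PySem.List.pyRange_one, List.map_map,
    show ((s.length : Int) - 1 - 0).toNat = s.length - 1 by omega, ← lemD1]
  apply List.map_congr_left
  intro k _
  simp only [Function.comp_def, zero_add, pvCastSucc, PySem.List.pyGetD_natCast]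

theorem pvMapDiff2 (s : List Int) :
    (PySem.List.pyRange 0 ((s.length : Int) - 1) 1).map
      (fun j => PySem.List.pyGetD s (j + 1) 0 - PySem.List.pyGetD s j 0) = pvDif2 s := by
  rw [PySem.List.pyRange_one, List.map_map,
    show ((s.length : Int) - 1 - 0).toNat = s.length - 1 by omega, ← lemD2]
  apply List.map_congr_left
  intro k _
  simp only [Function.comp_def, zero_add, pvCastSucc, PySem.List.pyGetD_natCast]

-- ===== VERDICT (by name: the statement is the Claim_ definition above) =====
theorem get_peak_diff_spec : Claim_equal_get_peak_diff := by
  intro peaks valleys heart_rate _ hpre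
  obtain ⟨hp, hv, _, _, hlen⟩ := hpre
  obtain ⟨p0, pt, rfl⟩ := List.exists_cons_of_ne_nil hp
  obtain ⟨v0, vt, rfl⟩ := List.exists_cons_of_ne_nil hv
  simp only [List.headI_cons] at hlen
  unfold Spec_get_peak_diff get_peak_diff get_peak_diff_alt
  simp only [PySem.List.foldl_append_singleton_eq_map, List.nil_append,
    PySem.List.pyGetD_zero_cons]
  set f : Int → Int := fun x => PySem.List.pyGetD heart_rate x 0 with hf
  set pr : List Int := (p0 :: pt).map f with hpr
  set vr : List Int := (v0 :: vt).map f with hvr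
  by_cases hc : p0 < v0
  · rw [if_pos hc] at hlen
    have hlen' : vr.length ≤ pr.length := by simpa [hpr, hvr] using hlen
    rw [if_pos hc, if_pos hc,
      pvFoldlShape _ (fun i => [PySem.List.pyGetD pr i 0 - PySem.List.pyGetD vr i 0] ++
        pvTail (PySem.List.pyGet? pr (i + 1)) (fun x => PySem.List.pyGetD vr i 0 - x))
        (fun a i => by rw [pvTry_eq, List.append_assoc]),
      pvFoldlShape _ (fun i => [PySem.List.pyGetD pr i 0, PySem.List.pyGetD vr i 0])
        (fun a i => rfl),
      List.nil_append, List.nil_append, pvFlatMapRange, pvFlatMapRange]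
    simp only [pvCastSucc, PySem.List.pyGet?_natCast, PySem.List.pyGetD_natCast]
    rw [pvIfApp, lemA1 vr pr hlen', lemB vr pr hlen', pvMapDiff1]
  · rw [if_neg hc] at hlen
    have hlen' : pr.length ≤ vr.length := by simpa [hpr, hvr] using hlen
    rw [if_neg hc, if_neg hc,
      pvFoldlShape _ (fun i => [PySem.List.pyGetD pr i 0 - PySem.List.pyGetD vr i 0] ++
        pvTail (PySem.List.pyGet? vr (i + 1)) (fun x => x - PySem.List.pyGetD pr i 0))
        (fun a i => by rw [pvTry_eq, List.append_assoc]),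
      pvFoldlShape _ (fun i => [PySem.List.pyGetD vr i 0, PySem.List.pyGetD pr i 0])
        (fun a i => rfl),
      List.nil_append, List.nil_append, pvFlatMapRange, pvFlatMapRange]
    simp only [pvCastSucc, PySem.List.pyGet?_natCast, PySem.List.pyGetD_natCast]
    rw [pvIfApp, lemA2 pr vr hlen', lemB pr vr hlen', pvMapDiff2]
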